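-- pv_equiv track=rewrite | github.com/Berteun/adventofcode2015 | day20/day20.py | part2
-- ===== SOURCE A (Python) =====
-- def part2(presents):
--     bound = presents // 10
--     divisors = [1] * bound
--     for n in range(2, bound):
--         for x in list(range(n, bound, n))[:50]:
--             divisors[x] += n
--     for i, d in enumerate(divisors):
--         if d*11 >= presents:
--             return i
-- ===== SOURCE B (Python) =====
-- def part2(presents):
--     bound = presents // 10
--     for h in range(bound):
--         total = 1 + sum(h // q for q in range(1, 51) if h % q == 0 and h // q >= 2)
--         if total * 11 >= presents:
--             return h
-- ===== Notes on version B (the rewrite author's own statement) =====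
-- stated objective: faster
-- what changed: Replaces A's up-front global sieve (a table of size presents//10 filled by one pass per elf over its first 50 multiples, then a scan) with a lazy house-by-house search that totals each house directly by probing its at most 50 possible cofactors q = h//d (d = h//q >= 2, q = 1..50), so no table is built and work stops at the answer house.
-- outside the precondition, e.g. on part2(12): A returns None, B returns None; on part2(45): A returns None, B returns None; on part2(-7): A returns None, B returns None
import Mathlib
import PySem

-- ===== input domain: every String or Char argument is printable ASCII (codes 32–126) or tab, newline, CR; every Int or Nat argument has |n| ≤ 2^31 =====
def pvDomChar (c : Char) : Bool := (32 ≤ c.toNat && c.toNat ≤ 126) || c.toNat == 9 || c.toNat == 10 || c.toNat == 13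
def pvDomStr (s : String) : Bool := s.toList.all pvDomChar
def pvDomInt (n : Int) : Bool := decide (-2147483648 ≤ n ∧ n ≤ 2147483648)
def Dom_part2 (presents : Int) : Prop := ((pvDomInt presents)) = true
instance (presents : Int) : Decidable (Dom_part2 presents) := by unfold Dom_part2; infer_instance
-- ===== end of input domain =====

-- B replaces A's global sieve table with a lazy house-by-house search that totals each house
-- directly by probing the at most 50 possible cofactors q = h // d, building no table.

-- ===== PORT A =====
-- final scan: 'for i, d in enumerate(divisors): if d*11 >= presents: return i';
-- -1 encodes falling off the end (Python's implicit None), excluded by Pre_part2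
def part2Find (presents : Int) : List Int → Int → Int
  | [], _ => -1
  | d :: ds, i => if d * 11 ≥ presents then i else part2Find presents ds (i + 1)

-- 'bound = presents // 10; divisors = [1]*bound; for n in range(2, bound):
--    for x in list(range(n, bound, n))[:50]: divisors[x] += n' then the scan above.
-- '[1]*bound' with a possibly negative bound is 'List.replicate bound.toNat 1';
-- the slice '[:50]' with nonnegative stop is '.take 50' (exact); indices x are always in range.
def part2 (presents : Int) : Int :=
  let bound := PySem.Int.floordiv presents 10
  let divisors : Array Int := Array.replicate bound.toNat 1
  let divisors :=
    (PySem.List.pyRange 2 bound 1).foldl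
      (fun ds n =>
        ((PySem.List.pyRange n bound n).take 50).foldl
          (fun ds x => ds.setIfInBounds x.toNat (ds.getD x.toNat 0 + n)) ds)
      divisors
  part2Find presents divisors.toList 0

-- ===== PORT B =====
-- 'sum(h // q for q in range(1, 51) if h % q == 0 and h // q >= 2)'
def sumDiv (h : Int) : Int :=
  (PySem.List.pyRange 1 51 1).foldl
    (fun acc q =>
      if PySem.Int.mod h q = 0 ∧ PySem.Int.floordiv h q ≥ 2
      then acc + PySem.Int.floordiv h q else acc) 0

-- 'for h in range(bound): total = 1 + sum(...); if total * 11 >= presents: return h';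
-- -1 encodes Python's implicit None, excluded by Pre_part2
def part2AltSearch (presents : Int) : List Int → Int
  | [] => -1
  | h :: hs =>
    let total := 1 + sumDiv h
    if total * 11 ≥ presents then h else part2AltSearch presents hs

def part2_alt (presents : Int) : Int :=
  part2AltSearch presents (PySem.List.pyRange 0 (PySem.Int.floordiv presents 10) 1)

-- ===== PRECONDITION & SPEC =====
-- Pre_part2 admits exactly the thresholds for which A's final scan finds a qualifying house
-- below presents // 10 and returns its index; on the excluded inputs A (and B) fall off the
-- end and return Python's None, which is not a value of the declared Int type.
def Pre_part2 (presents : Int) : Prop :=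
  (10 ≤ presents ∧ presents ≤ 11) ∨ (30 ≤ presents ∧ presents ≤ 33) ∨
    (40 ≤ presents ∧ presents ≤ 44) ∨ 50 ≤ presents
instance (presents : Int) : Decidable (Pre_part2 presents) := by unfold Pre_part2; infer_instance
def pvWitness_part2 : Int := 120

def Spec_part2 (presents : Int) (out : Int) : Prop := out = part2_alt presents
instance (presents : Int) (out : Int) : Decidable (Spec_part2 presents out) := by unfold Spec_part2; infer_instance

-- ===== CLAIM (what is proved, stated in full; the proofs are below) =====
def Claim_equal_part2 : Prop := ∀ (presents : Int), Dom_part2 presents → Pre_part2 presents → Spec_part2 presents (part2 presents)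

-- ===== LEMMAS AND PROOFS =====

-- the Array holding A's table, viewed as the corresponding List program
lemma arrGetD (a : Array Int) (i : Nat) : a.getD i 0 = a.toList.getD i 0 := by
  rw [List.getD_eq_getElem?_getD, Array.getElem?_toList]
  rcases Nat.lt_or_ge i a.size with h | h
  · simp [Array.getD, h]
  · simp [Array.getD, Nat.not_lt.mpr h]

lemma innerArr (n : Int) :
    ∀ (xs : List Int) (a : Array Int),
      (xs.foldl (fun ds x => ds.setIfInBounds x.toNat (ds.getD x.toNat 0 + n)) a).toList
        = xs.foldl (fun ds x => ds.set x.toNat (ds.getD x.toNat 0 + n)) a.toList := by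
  intro xs
  induction xs with
  | nil => intro a; rfl
  | cons x xs ih =>
    intro a
    rw [List.foldl_cons, List.foldl_cons, ih, Array.toList_setIfInBounds, arrGetD]

lemma outerArr (bound : Int) :
    ∀ (ns : List Int) (a : Array Int),
      (ns.foldl (fun ds n => ((PySem.List.pyRange n bound n).take 50).foldl
          (fun ds x => ds.setIfInBounds x.toNat (ds.getD x.toNat 0 + n)) ds) a).toList
        = ns.foldl (fun ds n => ((PySem.List.pyRange n bound n).take 50).foldl
          (fun ds x => ds.set x.toNat (ds.getD x.toNat 0 + n)) ds) a.toList := by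
  intro ns
  induction ns with
  | nil => intro a; rfl
  | cons m ns ih => intro a; rw [List.foldl_cons, List.foldl_cons, ih, innerArr]

-- the inner sieve loop preserves the table's length
lemma innerLen (n : Int) :
    ∀ (xs ds : List Int),
      (xs.foldl (fun ds x => ds.set x.toNat (ds.getD x.toNat 0 + n)) ds).length = ds.length := by
  intro xs
  induction xs with
  | nil => intro ds; rfl
  | cons x xs ih => intro ds; rw [List.foldl_cons, ih]; simp

lemma getD_set_self (l : List Int) (j : Nat) (v : Int) (h : j < l.length) :
    (l.set j v).getD j 0 = v := by
  simp [List.getD_eq_getElem?_getD, h]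

lemma getD_set_ne (l : List Int) (j k : Nat) (v : Int) (h : j ≠ k) :
    (l.set j v).getD k 0 = l.getD k 0 := by
  simp [List.getD_eq_getElem?_getD, h]

-- effect of one elf's pass over a duplicate-free list of in-range nonnegative indices
lemma innerGetD (n : Int) :
    ∀ (xs ds : List Int) (i : Nat), xs.Nodup →
      (∀ x ∈ xs, 0 ≤ x ∧ x.toNat < ds.length) →
      (xs.foldl (fun ds x => ds.set x.toNat (ds.getD x.toNat 0 + n)) ds).getD i 0
        = ds.getD i 0 + (if (i : Int) ∈ xs then n else 0) := by
  intro xs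
  induction xs with
  | nil => intro ds i _ _; simp
  | cons x xs ih =>
    intro ds i hnd hbd
    have hx := hbd x (List.mem_cons_self ..)
    have hnd' := List.nodup_cons.mp hnd
    rw [List.foldl_cons,
      ih (ds.set x.toNat (ds.getD x.toNat 0 + n)) i hnd'.2
        (by intro y hy; simpa using hbd y (List.mem_cons_of_mem _ hy))]
    by_cases hix : (i : Int) = x
    · have hxi : x.toNat = i := by omega
      have hnm : ¬ (i : Int) ∈ xs := by rw [hix]; exact hnd'.1
      have hilen : i < ds.length := by omega
      have hmc : (i : Int) ∈ x :: xs := by rw [hix]; exact List.mem_cons_self ..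
      rw [hxi, getD_set_self _ _ _ hilen, if_neg hnm, if_pos hmc, add_zero]
    · have hne : x.toNat ≠ i := by omega
      rw [getD_set_ne _ _ _ _ hne]
      simp [List.mem_cons, hix]

-- the 50 sieved multiples of n are pairwise distinct
lemma nodup_take50 (n bound : Int) (hn : 0 < n) :
    ((PySem.List.pyRange n bound n).take 50).Nodup := by
  rw [PySem.List.pyRange_of_pos n bound hn, ← List.map_take, List.take_range]
  refine List.Nodup.map ?_ List.nodup_range
  intro a b hab
  have h1 : n * (a : Int) = n * (b : Int) := by linarith
  have h2 := mul_left_cancel₀ (by omega : n ≠ 0) h1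
  exact_mod_cast h2

lemma mem_take50_bounds (n bound x : Int) (hn : 0 < n)
    (hx : x ∈ (PySem.List.pyRange n bound n).take 50) : n ≤ x ∧ x < bound := by
  have hm := List.mem_of_mem_take hx
  have h := (PySem.List.mem_pyRange_iff_of_pos hn x).mp hm
  exact ⟨h.1, h.2.1⟩

lemma outerLen (bound : Int) :
    ∀ (ns ds : List Int),
      (ns.foldl (fun ds n => ((PySem.List.pyRange n bound n).take 50).foldl
          (fun ds x => ds.set x.toNat (ds.getD x.toNat 0 + n)) ds) ds).length = ds.length := by
  intro ns
  induction ns with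
  | nil => intro ds; rfl
  | cons m ns ih => intro ds; rw [List.foldl_cons, ih, innerLen]

-- the whole sieve adds, at index i, the sum of the elves n that visit house i
lemma outerGetD (bound : Int) :
    ∀ (ns ds : List Int) (i : Nat),
      (∀ n ∈ ns, 2 ≤ n) → bound.toNat ≤ ds.length →
      (ns.foldl (fun ds n => ((PySem.List.pyRange n bound n).take 50).foldl
          (fun ds x => ds.set x.toNat (ds.getD x.toNat 0 + n)) ds) ds).getD i 0
        = ds.getD i 0
          + ((ns.map (fun n =>
               if (i : Int) ∈ (PySem.List.pyRange n bound n).take 50 then n else 0)).sum) := by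
  intro ns
  induction ns with
  | nil => intro ds i _ _; simp
  | cons m ns ih =>
    intro ds i hge hlen
    have hm : 2 ≤ m := hge m (List.mem_cons_self ..)
    rw [List.foldl_cons,
      ih _ i (fun n hn => hge n (List.mem_cons_of_mem _ hn)) (by rw [innerLen]; exact hlen),
      innerGetD m _ ds i (nodup_take50 m bound (by omega))
        (by
          intro x hx
          have hb := mem_take50_bounds m bound x (by omega) hx
          exact ⟨by omega, by omega⟩)]
    simp only [List.map_cons, List.sum_cons]
    ring

-- house x is among the first 50 sieved multiples of d  ↔  d divides x and x/d ≤ 50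
lemma mem_take50_iff (d bound x : Int) (hd : 2 ≤ d) (hx : d ≤ x) (hxb : x < bound) :
    (x ∈ (PySem.List.pyRange d bound d).take 50) ↔ (d ∣ x ∧ x / d ≤ 50) := by
  have hd0 : 0 < d := by omega
  have hdb : d < bound := by omega
  rw [PySem.List.pyRange_of_pos d bound hd0, if_pos hdb, ← List.map_take, List.take_range]
  have hm : bound - d + d - 1 = bound - 1 := by ring
  rw [hm]
  constructor
  · intro hmem
    obtain ⟨k, hk, hfk⟩ := List.mem_map.mp hmem
    have hk50 : (k : Int) < 50 := by
      have := List.mem_range.mp hk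
      omega
    have hxe : x = d * (1 + (k : Int)) := by rw [← hfk]; ring
    refine ⟨⟨1 + (k : Int), hxe⟩, ?_⟩
    rw [hxe, Int.mul_ediv_cancel_left _ (by omega : d ≠ 0)]
    omega
  · rintro ⟨⟨c, hc⟩, hq⟩
    have hc1 : 1 ≤ c := by
      by_contra hbad
      have hle := mul_le_mul_of_nonneg_left (show c ≤ 0 by omega) (le_of_lt hd0)
      rw [mul_zero, ← hc] at hle
      omega
    have hq' : x / d = c := by rw [hc, Int.mul_ediv_cancel_left _ (by omega : d ≠ 0)]
    rw [hq'] at hq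
    have hcb : c ≤ (bound - 1) / d := by
      rw [Int.le_ediv_iff_mul_le hd0]
      have hcd : c * d = x := by rw [hc]; ring
      omega
    refine List.mem_map.mpr ⟨(c - 1).toNat, List.mem_range.mpr (by omega), ?_⟩
    have hcast : (((c - 1).toNat) : Int) = c - 1 := by omega
    rw [hcast, hc]
    ring

-- B's cofactor loop as a sum over the candidates q = 1..50
lemma sumDiv_eq_sum (h : Int) :
    sumDiv h = ((PySem.List.pyRange 1 51 1).map
        (fun q => if PySem.Int.mod h q = 0 ∧ PySem.Int.floordiv h q ≥ 2
                  then PySem.Int.floordiv h q else 0)).sum := by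
  unfold sumDiv
  rw [show (fun (acc q : Int) =>
        if PySem.Int.mod h q = 0 ∧ PySem.Int.floordiv h q ≥ 2
        then acc + PySem.Int.floordiv h q else acc)
      = (fun (acc q : Int) =>
        acc + (if PySem.Int.mod h q = 0 ∧ PySem.Int.floordiv h q ≥ 2
               then PySem.Int.floordiv h q else 0)) from by
      funext acc q
      split_ifs <;> simp,
    PySem.List.foldl_add]
  simp

-- a sum of a function over 'List.range' is the Finset.range sum
lemma listSum_range_eq (n : Nat) (f : Nat → Int) :
    ((List.range n).map f).sum = ∑ k ∈ Finset.range n, f k := rfl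

-- the divisor-candidate sum over d = 2..i, in Nat divisor form
lemma L_eq_A (i : Nat) (h1 : 1 ≤ i) :
    ((PySem.List.pyRange 2 ((i : Int) + 1) 1).map
        (fun d => if d ∣ (i : Int) ∧ (i : Int) / d ≤ 50 then d else 0)).sum
      = ∑ d ∈ Finset.Ico 2 (i + 1), (if d ∣ i ∧ i / d ≤ 50 then (d : Int) else 0) := by
  rw [PySem.List.pyRange_one, List.map_map, Finset.sum_Ico_eq_sum_range]
  have hn : ((i : Int) + 1 - 2).toNat = i + 1 - 2 := by omega
  rw [hn, listSum_range_eq]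
  apply Finset.sum_congr rfl
  intro k _
  simp only [Function.comp_apply]
  have hc : (2 : Int) + (k : Int) = ((2 + k : Nat) : Int) := by push_cast; ring
  have h50 : ∀ m : Nat, ((m : Int) ≤ 50) ↔ m ≤ 50 := fun m => by omega
  rw [hc]
  simp only [Int.natCast_dvd_natCast, ← Int.natCast_div, h50]

-- extend the interval sum to the divisor Finset
lemma sum_Ico_to_divisors (i : Nat) (h1 : 1 ≤ i) :
    ∑ d ∈ Finset.Ico 2 (i + 1), (if d ∣ i ∧ i / d ≤ 50 then (d : Int) else 0)
      = ∑ d ∈ i.divisors, (if 2 ≤ d ∧ i / d ≤ 50 then (d : Int) else 0) := by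
  rw [← Finset.sum_filter, ← Finset.sum_filter]
  apply Finset.sum_congr ?_ (fun _ _ => rfl)
  ext d
  simp only [Finset.mem_filter, Finset.mem_Ico, Nat.mem_divisors]
  constructor
  · rintro ⟨⟨h2, hlt⟩, hdvd, h50⟩
    exact ⟨⟨hdvd, by omega⟩, h2, h50⟩
  · rintro ⟨⟨hdvd, hne⟩, h2, h50⟩
    have hb := Nat.le_of_dvd (by omega) hdvd
    exact ⟨⟨h2, by omega⟩, hdvd, h50⟩

-- reindex the divisor sum by the cofactor q = i / d
lemma divisors_flip (i : Nat) (h1 : 1 ≤ i) :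
    ∑ d ∈ i.divisors, (if 2 ≤ d ∧ i / d ≤ 50 then (d : Int) else 0)
      = ∑ q ∈ i.divisors, (if q ≤ 50 ∧ 2 ≤ i / q then ((i / q : Nat) : Int) else 0) := by
  refine Eq.trans ?_
    (Nat.sum_div_divisors i (fun q => if q ≤ 50 ∧ 2 ≤ i / q then ((i / q : Nat) : Int) else 0))
  apply Finset.sum_congr rfl
  intro d hd
  have hdd : i / (i / d) = d := Nat.div_div_self (Nat.mem_divisors.mp hd).1 (by omega)
  rw [hdd]
  exact if_congr and_comm rfl rfl

-- B's cofactor sum, in the same Nat divisor form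
lemma sumDiv_nat (i : Nat) (h1 : 1 ≤ i) :
    sumDiv (i : Int) = ∑ q ∈ i.divisors, (if q ≤ 50 ∧ 2 ≤ i / q then ((i / q : Nat) : Int) else 0) := by
  rw [sumDiv_eq_sum, PySem.List.pyRange_one, List.map_map]
  have hn : ((51 : Int) - 1).toNat = 50 := by omega
  rw [hn, listSum_range_eq]
  refine Eq.trans (b := ∑ q ∈ Finset.Ico 1 51, (if q ∣ i ∧ 2 ≤ i / q then ((i / q : Nat) : Int) else 0)) ?_ ?_
  · rw [Finset.sum_Ico_eq_sum_range, show (51 - 1 : Nat) = 50 from rfl]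
    apply Finset.sum_congr rfl
    intro k _
    simp only [Function.comp_apply]
    have hq : (1 : Int) + (k : Int) = ((1 + k : Nat) : Int) := by push_cast; ring
    have hpos : (0 : Int) < ((1 + k : Nat) : Int) := by omega
    have h2iff : ∀ m : Nat, ((m : Int) ≥ 2) ↔ 2 ≤ m := fun m => by omega
    rw [hq]
    simp only [PySem.Int.mod_eq_zero_iff_dvd, Int.natCast_dvd_natCast,
      PySem.Int.floordiv_eq_ediv_of_pos hpos, ← Int.natCast_div, h2iff]
  · rw [← Finset.sum_filter, ← Finset.sum_filter]
    apply Finset.sum_congr ?_ (fun _ _ => rfl)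
    ext q
    simp only [Finset.mem_filter, Finset.mem_Ico, Nat.mem_divisors]
    constructor
    · rintro ⟨⟨hq1, hq51⟩, hdvd, h2⟩
      exact ⟨⟨hdvd, by omega⟩, by omega, h2⟩
    · rintro ⟨⟨hdvd, hne⟩, hq50, h2⟩
      have hq0 : q ≠ 0 := by
        rintro rfl
        exact (by omega : i ≠ 0) (Nat.eq_zero_of_zero_dvd hdvd)
      exact ⟨⟨by omega, by omega⟩, hdvd, h2⟩

-- the sieve's entry for house i is exactly B's per-house total 1 + sumDiv i
lemma weight_eq (bound : Int) (i : Nat) (hi : (i : Int) < bound) :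
    ((PySem.List.pyRange 2 bound 1).foldl
        (fun ds n => ((PySem.List.pyRange n bound n).take 50).foldl
          (fun ds x => ds.set x.toNat (ds.getD x.toNat 0 + n)) ds)
        (List.replicate bound.toNat 1)).getD i 0
      = 1 + sumDiv i := by
  rw [outerGetD bound _ _ i
      (fun n hn => ((PySem.List.mem_pyRange_one).mp hn).1)
      (by simp)]
  have hrep : (List.replicate bound.toNat (1 : Int)).getD i 0 = 1 := by
    have hlt : i < bound.toNat := by omega
    simp [List.getD_eq_getElem?_getD, hlt]
  rw [hrep]
  congr 1
  by_cases h1 : 1 ≤ i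
  · rw [PySem.List.pyRange_one_append 2 ((i : Int) + 1) bound (by omega) (by omega),
      List.map_append, List.sum_append]
    have htail : ((PySem.List.pyRange ((i : Int) + 1) bound 1).map (fun n =>
        if (i : Int) ∈ (PySem.List.pyRange n bound n).take 50 then n else 0)).sum = 0 := by
      apply List.sum_eq_zero
      intro y hy
      obtain ⟨n, hn, rfl⟩ := List.mem_map.mp hy
      have hge : (i : Int) + 1 ≤ n := ((PySem.List.mem_pyRange_one).mp hn).1
      rw [if_neg]
      intro hmem
      have hb := mem_take50_bounds n bound (i : Int) (by omega) hmem
      omega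
    rw [htail, add_zero]
    have hmap : (PySem.List.pyRange 2 ((i : Int) + 1) 1).map (fun n =>
          if (i : Int) ∈ (PySem.List.pyRange n bound n).take 50 then n else 0)
        = (PySem.List.pyRange 2 ((i : Int) + 1) 1).map
          (fun d => if d ∣ (i : Int) ∧ (i : Int) / d ≤ 50 then d else 0) := by
      apply List.map_congr_left
      intro d hd
      have hd2 : 2 ≤ d := ((PySem.List.mem_pyRange_one).mp hd).1
      have hdi : d ≤ (i : Int) := by
        have := ((PySem.List.mem_pyRange_one).mp hd).2
        omega
      have hiff := mem_take50_iff d bound (i : Int) hd2 hdi hi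
      simp only [hiff]
    rw [hmap, L_eq_A i h1, sum_Ico_to_divisors i h1, divisors_flip i h1, ← sumDiv_nat i h1]
  · have hi0 : i = 0 := by omega
    subst hi0
    simp only [Nat.cast_zero]
    rw [show sumDiv 0 = 0 from by decide]
    apply List.sum_eq_zero
    intro y hy
    obtain ⟨n, hn, rfl⟩ := List.mem_map.mp hy
    have h2 : 2 ≤ n := ((PySem.List.mem_pyRange_one).mp hn).1
    rw [if_neg]
    intro hmem
    have hb := mem_take50_bounds n bound 0 (by omega) hmem
    omega

-- A's indexed scan over the table of weights is B's search over the houses themselves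
lemma find_search (p : Int) :
    ∀ (k : Nat) (a b : Int), (b - a).toNat = k →
      part2Find p ((PySem.List.pyRange a b 1).map (fun h => 1 + sumDiv h)) a
        = part2AltSearch p (PySem.List.pyRange a b 1) := by
  intro k
  induction k with
  | zero =>
    intro a b hk
    rw [PySem.List.pyRange_one_eq_nil (by omega)]
    rfl
  | succ k ih =>
    intro a b hk
    rw [PySem.List.pyRange_one_cons (by omega : a < b)]
    simp only [List.map_cons, part2Find, part2AltSearch]
    split
    · rfl
    · exact ih (a + 1) b (by omega)

lemma part2_eq (p : Int) : part2 p = part2_alt p := by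
  simp only [part2, part2_alt]
  rw [outerArr, Array.toList_replicate]
  have hS : ((PySem.List.pyRange 2 (PySem.Int.floordiv p 10) 1).foldl
      (fun ds n => ((PySem.List.pyRange n (PySem.Int.floordiv p 10) n).take 50).foldl
        (fun ds x => ds.set x.toNat (ds.getD x.toNat 0 + n)) ds)
      (List.replicate (PySem.Int.floordiv p 10).toNat 1))
      = (PySem.List.pyRange 0 (PySem.Int.floordiv p 10) 1).map (fun h => 1 + sumDiv h) := by
    apply List.ext_getElem
    · rw [outerLen]
      simp [PySem.List.length_pyRange_one]
    · intro i h1 h2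
      have hlen : ((PySem.List.pyRange 2 (PySem.Int.floordiv p 10) 1).foldl
          (fun ds n => ((PySem.List.pyRange n (PySem.Int.floordiv p 10) n).take 50).foldl
            (fun ds x => ds.set x.toNat (ds.getD x.toNat 0 + n)) ds)
          (List.replicate (PySem.Int.floordiv p 10).toNat 1)).length
          = (PySem.Int.floordiv p 10).toNat := by
        rw [outerLen]; simp
      have hib : (i : Int) < PySem.Int.floordiv p 10 := by
        rw [hlen] at h1; omega
      rw [← List.getD_eq_getElem _ 0 h1, weight_eq _ i hib, List.getElem_map,
        PySem.List.getElem_pyRange_one]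
      simp
  rw [hS]
  exact find_search p ((PySem.Int.floordiv p 10) - 0).toNat 0 (PySem.Int.floordiv p 10) rfl

-- ===== VERDICT (by name: the statement is the Claim_ definition above) =====
theorem part2_spec : Claim_equal_part2 := by
  intro p _ _
  show part2 p = part2_alt p
  exact part2_eq p
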